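-- pv_equiv track=rewrite | github.com/xiongyuchuan3294/api-data-gen | api-data-gen/src/api_data_gen/services/cross_table_alignment_service.py | _collect_actual_values
-- ===== SOURCE A (Python) =====
-- def _collect_actual_values(rows: list[dict[str, str | None]], column_name: str) -> list[str]:
--     ordered: list[str] = []
--     for row in rows:
--         value = row.get(column_name)
--         if value is None:
--             continue
--         text = str(value)
--         if text not in ordered:
--             ordered.append(text)
--     return ordered
-- ===== SOURCE B (Python) =====
-- def _collect_actual_values(rows: list[dict[str, str | None]], column_name: str) -> list[str]:
--     # Stage 1: extract the stream of non-None stringified values.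
--     pending = [str(v) for row in rows if (v := row.get(column_name)) is not None]
--     # Stage 2: sieve — emit the head, drop all its later duplicates, repeat.
--     out: list[str] = []
--     while pending:
--         head = pending[0]
--         out.append(head)
--         pending = [x for x in pending[1:] if x != head]
--     return out
-- ===== Notes on version B (the rewrite author's own statement) =====
-- stated objective: alternative
-- what changed: Two-stage sieve: first extract the stream of non-None values, then repeatedly emit the head and filter all its duplicates out of the remaining stream, so there is no accumulator membership test at all; correctness holds because removing later duplicates of an emitted value is exactly keep-first-occurrence dedup.
import Mathlib
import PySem

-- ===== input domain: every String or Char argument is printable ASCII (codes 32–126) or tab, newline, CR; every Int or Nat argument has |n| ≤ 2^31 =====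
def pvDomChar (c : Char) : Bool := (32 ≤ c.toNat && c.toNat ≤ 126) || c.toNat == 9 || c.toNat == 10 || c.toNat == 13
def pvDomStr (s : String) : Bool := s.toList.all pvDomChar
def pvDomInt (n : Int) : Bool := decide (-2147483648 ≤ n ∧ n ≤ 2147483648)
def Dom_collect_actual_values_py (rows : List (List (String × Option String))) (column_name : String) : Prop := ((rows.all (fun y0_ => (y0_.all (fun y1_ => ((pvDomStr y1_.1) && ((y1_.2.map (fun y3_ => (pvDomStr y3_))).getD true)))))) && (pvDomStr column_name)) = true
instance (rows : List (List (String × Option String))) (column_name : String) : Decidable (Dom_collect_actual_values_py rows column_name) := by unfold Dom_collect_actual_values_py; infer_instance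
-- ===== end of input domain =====

-- B replaces A's accumulator-with-membership-scan by a two-stage sieve: extract the
-- non-None value stream, then repeatedly emit the head and filter its duplicates out
-- of the remainder (alternative decomposition, same cost).

-- ===== PORT A =====
def collect_actual_values_py (rows : List (List (String × Option String))) (column_name : String) : List String :=
  rows.foldl (fun ordered row =>
    let value : Option String := ((PySem.Dict.mk row).get? column_name).getD none
    match value with
    | none => ordered
    | some v =>
      let text := v  -- str(value) on a str is the str itself
      if text ∈ ordered then ordered else ordered ++ [text]) []

-- ===== PORT B =====
-- the while loop of Source B: emit pending[0], keep only x ≠ head from pending[1:], repeat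
def pvSieve : List String → List String
  | [] => []
  | head :: rest => head :: pvSieve (rest.filter (fun x => x ≠ head))
termination_by l => l.length
decreasing_by
  have h := List.length_filter_le (fun x : {x // x ∈ rest} => decide (x.1 ≠ head)) rest.attach
  simp only [List.length_attach] at h
  simpa [List.length_unattach] using Nat.lt_succ_of_le h

def collect_actual_values_py_alt (rows : List (List (String × Option String))) (column_name : String) : List String :=
  -- stage 1: the non-None value stream (str(v) on a str is v)
  let pending := rows.filterMap (fun row => ((PySem.Dict.mk row).get? column_name).getD none)
  -- stage 2: the sieve loop
  pvSieve pending

-- ===== PRECONDITION & SPEC =====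
def Spec_collect_actual_values_py (rows : List (List (String × Option String))) (column_name : String) (out : List String) : Prop := out = collect_actual_values_py_alt rows column_name
instance (rows : List (List (String × Option String))) (column_name : String) (out : List String) : Decidable (Spec_collect_actual_values_py rows column_name out) := by unfold Spec_collect_actual_values_py; infer_instance

-- ===== CLAIM =====
def Claim_equal_collect_actual_values_py : Prop := ∀ (rows : List (List (String × Option String))) (column_name : String), Dom_collect_actual_values_py rows column_name → Spec_collect_actual_values_py rows column_name (collect_actual_values_py rows column_name)

-- ===== LEMMAS AND PROOFS =====

-- A's fold is Set.update of the accumulator by the stream of non-None values.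
theorem collectA_foldl_eq_update (column_name : String)
    (rows : List (List (String × Option String))) (acc : List String) :
    rows.foldl (fun ordered row =>
      let value : Option String := ((PySem.Dict.mk row).get? column_name).getD none
      match value with
      | none => ordered
      | some v =>
        let text := v
        if text ∈ ordered then ordered else ordered ++ [text]) acc
    = PySem.Set.update acc
        (rows.filterMap (fun row => ((PySem.Dict.mk row).get? column_name).getD none)) := by
  induction rows generalizing acc with
  | nil => simp [PySem.Set.update]
  | cons row rest ih =>
    simp only [List.foldl_cons, List.filterMap_cons]
    cases h : ((PySem.Dict.mk row).get? column_name).getD none with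
    | none => simpa [h] using ih acc
    | some v =>
      rw [PySem.Set.update_cons, ih]
      congr 1
      simp [PySem.Set.add]

-- Set.update acc l keeps acc and appends the sieve of l's elements not already in acc.
theorem update_eq_append_sieve (l : List String) (acc : List String) :
    PySem.Set.update acc l = acc ++ pvSieve (l.filter (fun x => decide (x ∉ acc))) := by
  induction hl : l.length generalizing l acc with
  | zero =>
    cases l with
    | nil => rw [pvSieve.eq_def]; simp [PySem.Set.update]
    | cons a t => simp at hl
  | succ n ih =>
    cases l with
    | nil => simp at hl
    | cons v rest =>
      rw [PySem.Set.update_cons]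
      by_cases hv : v ∈ acc
      · have : PySem.Set.add acc v = acc := by simp [PySem.Set.add, hv]
        rw [this, ih rest acc (by simpa using hl), List.filter_cons]
        simp [hv]
      · have : PySem.Set.add acc v = acc ++ [v] := by simp [PySem.Set.add, hv]
        rw [this, ih rest (acc ++ [v]) (by simpa using hl), List.filter_cons]
        simp only [hv, not_false_eq_true, decide_true, if_pos]
        have hfilt : rest.filter (fun x => decide (x ∉ acc ++ [v]))
            = (rest.filter (fun x => decide (x ∉ acc))).filter (fun x => x ≠ v) := by
          rw [List.filter_filter]
          apply List.filter_congr
          intro x _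
          simp [List.mem_append, and_comm, ne_eq]
        rw [hfilt]
        conv_rhs => rw [pvSieve.eq_def]
        simp

-- ===== VERDICT =====
theorem collect_actual_values_py_spec : Claim_equal_collect_actual_values_py := by
  intro rows column_name _
  unfold Spec_collect_actual_values_py collect_actual_values_py collect_actual_values_py_alt
  rw [collectA_foldl_eq_update, update_eq_append_sieve]
  simp
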